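-- pv_equiv track=rewrite | github.com/Ace5584/trash_classification_v1 | UI.py | process_result
-- ===== SOURCE A (Python) =====
-- item_list = ["Cardboard", "Glass", "Metal", "Paper", "Plastic", "Trash"]
--
-- def process_result(li):
--   temp = list()
--   for item in li:
--     for num in item:
--       temp.append(num)
--   li = temp.copy()
--   highest_val = max(li)
--   index = li.index(highest_val)
--   return item_list[index]
-- ===== SOURCE B (Python) =====
-- item_list = ["Cardboard", "Glass", "Metal", "Paper", "Plastic", "Trash"]
--
-- def process_result(li):
--   # single fused pass: track best value and its flat index; no flattened copy
--   best_val = None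
--   best_idx = 0
--   i = 0
--   for sub in li:
--     for x in sub:
--       if best_val is None or x > best_val:
--         best_val = x
--         best_idx = i
--       i += 1
--   if best_val is None:
--     raise ValueError("max() arg is an empty sequence")
--   return item_list[best_idx]
-- ===== Notes on version B (the rewrite author's own statement) =====
-- stated objective: idiomatic
-- what changed: Instead of materialising a flattened copy and then scanning it twice (max, then .index), B does one fused pass over the nested list with a flat counter, keeping the best value and its first index (strict > so the first occurrence of the maximum wins).
import Mathlib
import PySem

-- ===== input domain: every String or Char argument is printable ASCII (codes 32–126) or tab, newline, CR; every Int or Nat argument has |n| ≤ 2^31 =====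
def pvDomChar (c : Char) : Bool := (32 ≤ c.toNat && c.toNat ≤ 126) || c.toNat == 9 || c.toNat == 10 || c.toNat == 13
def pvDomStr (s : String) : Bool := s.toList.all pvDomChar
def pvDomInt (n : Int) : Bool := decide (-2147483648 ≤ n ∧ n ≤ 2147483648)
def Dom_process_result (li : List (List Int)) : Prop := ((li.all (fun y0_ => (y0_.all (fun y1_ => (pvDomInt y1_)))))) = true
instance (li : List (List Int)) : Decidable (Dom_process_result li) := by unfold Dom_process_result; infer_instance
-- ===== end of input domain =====

-- B replaces A's flatten-then-max-then-index (three passes plus a copy) by one fused pass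
-- tracking the best value and its first flat index (idiomatic single-traversal argmax).

def item_list : List String := ["Cardboard", "Glass", "Metal", "Paper", "Plastic", "Trash"]

-- ===== PORT A =====
def process_result (li : List (List Int)) : String :=
  let temp := li.foldl (fun temp item => item.foldl (fun t num => t ++ [num]) temp) []
  match PySem.List.max? temp (fun x => x) with
  | none => ""            -- Python: Python raises ValueError on an empty sequence; excluded by Pre_
  | some highest_val =>
    match PySem.List.index? temp highest_val with
    | none => ""          -- unreachable: highest_val ∈ temp
    | some index => (PySem.List.pyGet? item_list (index : Int)).getD ""
                          -- none = IndexError (index ≥ 6); excluded by Pre_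

-- ===== PORT B =====
-- one step of the fused scan: state = (flat counter i, best-so-far as Option (value, index))
def bstep (st : Int × Option (Int × Int)) (x : Int) : Int × Option (Int × Int) :=
  match st with
  | (i, none) => (i + 1, some (x, i))
  | (i, some (bv, bi)) => if bv < x then (i + 1, some (x, i)) else (i + 1, some (bv, bi))

def process_result_alt (li : List (List Int)) : String :=
  let st := li.foldl (fun st sub => sub.foldl bstep st) ((0 : Int), (none : Option (Int × Int)))
  match st.2 with
  | none => ""            -- Python B raises ValueError; excluded by Pre_
  | some (_, best_idx) => (PySem.List.pyGet? item_list best_idx).getD ""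
                          -- none = IndexError (best_idx ≥ 6); excluded by Pre_

-- ===== PRECONDITION & SPEC =====
-- Pre_ = exactly the inputs where Python A returns: the flattened list is nonempty (else
-- A raises ValueError) and its first maximum occurs at flat index < 6 (else the
-- item_list lookup raises IndexError). Python B raises at the same inputs, so the
-- ports agree even outside Pre_; Pre_ only marks where the Pythons return.
def Pre_process_result (li : List (List Int)) : Prop :=
  li.flatten ≠ [] ∧ ∃ x ∈ li.flatten.take 6, ∀ y ∈ li.flatten, y ≤ x
instance (li : List (List Int)) : Decidable (Pre_process_result li) := by
  unfold Pre_process_result; infer_instance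
def pvWitness_process_result : List (List Int) := [[1, 2], [3]]

def Spec_process_result (li : List (List Int)) (out : String) : Prop := out = process_result_alt li
instance (li : List (List Int)) (out : String) : Decidable (Spec_process_result li out) := by unfold Spec_process_result; infer_instance

-- ===== CLAIM (what is proved, stated in full; the proofs are below) =====
def Claim_equal_process_result : Prop := ∀ (li : List (List Int)), Dom_process_result li → Pre_process_result li → Spec_process_result li (process_result li)

-- ===== LEMMAS AND PROOFS =====

-- B's outer loop over the nested list is the scan of the flattened list.
lemma foldl_bstep_flatten (li : List (List Int)) (s : Int × Option (Int × Int)) :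
    li.foldl (fun st sub => sub.foldl bstep st) s = li.flatten.foldl bstep s := by
  induction li generalizing s with
  | nil => rfl
  | cons h t ih => simp [List.foldl_append, ih]

-- A's two loops build the flattened list.
lemma temp_eq_flatten (li : List (List Int)) :
    li.foldl (fun temp item => item.foldl (fun t num => t ++ [num]) temp) [] = li.flatten := by
  have h : (fun (temp : List Int) (item : List Int) =>
      item.foldl (fun t num => t ++ [num]) temp) = (fun temp item => temp ++ item) := by
    funext temp item
    exact PySem.List.foldl_append_singleton_eq_self ..
  rw [h, PySem.List.foldl_append_eq_flatten]
  simp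

-- invariant of the fused scan starting from a non-none state
lemma bstep_run (l : List Int) (i bv bi : Int) :
    l.foldl bstep (i, some (bv, bi)) =
      (i + l.length,
       some (l.foldl max bv,
         if bv < l.foldl max bv
         then i + (((PySem.List.index? l (l.foldl max bv)).getD 0 : Nat) : Int)
         else bi)) := by
  induction l generalizing i bv bi with
  | nil => simp
  | cons x xs ih =>
    by_cases h : bv < x
    · have hM : (x :: xs).foldl max bv = xs.foldl max x := by
        simp [List.foldl_cons, max_eq_right h.le]
      have hxle : x ≤ xs.foldl max x := (PySem.List.le_foldl_max xs x).1
      simp only [List.foldl_cons, bstep, if_pos h, ih, hM]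
      by_cases hx : x = xs.foldl max x
      · rw [if_neg (by omega : ¬ x < xs.foldl max x),
          if_pos (by omega : bv < xs.foldl max x), ← hx,
          PySem.List.index?_cons_self]
        simp only [Prod.mk.injEq, Option.some.injEq, Option.getD_some, List.length_cons, true_and]
        push_cast; omega
      · have hxlt : x < xs.foldl max x := lt_of_le_of_ne hxle hx
        have hmem : xs.foldl max x ∈ xs := by
          rcases PySem.List.foldl_max_mem xs x with hh | hh
          · omega
          · exact hh
        obtain ⟨k, hk⟩ := Option.isSome_iff_exists.1
          ((PySem.List.index?_isSome_iff xs (xs.foldl max x)).2 hmem)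
        rw [if_pos hxlt, if_pos (by omega : bv < xs.foldl max x),
          PySem.List.index?_cons_of_ne _ (by omega : x ≠ xs.foldl max x), hk]
        simp only [Prod.mk.injEq, Option.some.injEq, Option.map_some, Option.getD_some,
          List.length_cons, true_and]
        push_cast; omega
    · have hM : (x :: xs).foldl max bv = xs.foldl max bv := by
        simp [List.foldl_cons, max_eq_left (by omega : x ≤ bv)]
      simp only [List.foldl_cons, bstep, if_neg h, ih, hM]
      by_cases hb : bv < xs.foldl max bv
      · have hxne : x ≠ xs.foldl max bv := by omega
        have hmem : xs.foldl max bv ∈ xs := by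
          rcases PySem.List.foldl_max_mem xs bv with hh | hh
          · omega
          · exact hh
        obtain ⟨k, hk⟩ := Option.isSome_iff_exists.1
          ((PySem.List.index?_isSome_iff xs (xs.foldl max bv)).2 hmem)
        rw [if_pos hb, if_pos hb, PySem.List.index?_cons_of_ne _ hxne, hk]
        simp only [Prod.mk.injEq, Option.some.injEq, Option.map_some, Option.getD_some,
          List.length_cons, true_and]
        push_cast; omega
      · rw [if_neg hb, if_neg hb]
        simp only [Prod.mk.injEq, List.length_cons, and_true]
        push_cast; omega

lemma ports_agree (li : List (List Int)) : process_result li = process_result_alt li := by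
  unfold process_result process_result_alt
  rw [temp_eq_flatten, foldl_bstep_flatten]
  cases hfl : li.flatten with
  | nil => simp [PySem.List.max?]
  | cons x xs =>
    simp only [PySem.List.max?_id_cons]
    have hB : (x :: xs).foldl bstep ((0 : Int), (none : Option (Int × Int))) =
        ((1 + (xs.length : Int) : Int),
         some (xs.foldl max x,
           if x < xs.foldl max x
           then 1 + (((PySem.List.index? xs (xs.foldl max x)).getD 0 : Nat) : Int)
           else 0)) := by
      rw [List.foldl_cons]
      show xs.foldl bstep (1, some (x, 0)) = _
      rw [bstep_run]
    rw [hB]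
    by_cases hx : x = xs.foldl max x
    · rw [← hx, PySem.List.index?_cons_self,
        if_neg (by omega : ¬ x < x)]
      simp
    · have hxle : x ≤ xs.foldl max x := (PySem.List.le_foldl_max xs x).1
      have hxlt : x < xs.foldl max x := lt_of_le_of_ne hxle hx
      have hmem : xs.foldl max x ∈ xs := by
        rcases PySem.List.foldl_max_mem xs x with hh | hh
        · omega
        · exact hh
      obtain ⟨k, hk⟩ := Option.isSome_iff_exists.1
        ((PySem.List.index?_isSome_iff xs (xs.foldl max x)).2 hmem)
      rw [PySem.List.index?_cons_of_ne _ hx, hk, if_pos hxlt]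
      simp only [Option.map_some, Option.getD_some]
      norm_num [add_comm]

-- ===== VERDICT (by name: the statement is the Claim_ definition above) =====
theorem process_result_spec : Claim_equal_process_result := by
  intro li _ _
  exact ports_agree li
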